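-- pv_equiv track=rewrite | github.com/K1SKEE/codewars | Last digit symmetry.py | solve
-- ===== SOURCE A (Python) =====
-- def solve(a, b):
--     result = 0
--     for x in range(a, b):
--         if len(str(x)) >= 4:
--             op = str(x)[:2]
--             lastx = str(x)[-1:-2]
--
--             for i in range(2, int(op)):
--                 if int(op) % i == 0:
--                     break
--             else:
--                 squared = str(x * x)[:2]
--                 lastsquared = str(squared)[-1:-2]
--                 for n in range(2, int(squared)):
--                     if int(squared) % n == 0:
--                         break
--                 else:
--                     if lastx==lastsquared:
--                         result += 1
--     return result
-- ===== SOURCE B (Python) =====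
-- def solve(a, b):
--     # Per-candidate sqrt-bounded trial division on the two leading digits, parsed once
--     # (A re-parses int(op) on every divisor trial and scans all divisors below op).
--     def lead_is_prime(m):
--         h = int(str(m)[:2])
--         i = 2
--         while i * i <= h:
--             if h % i == 0:
--                 return False
--             i += 1
--         return True
--     return sum(1 for x in range(a, b)
--                if len(str(x)) >= 4 and lead_is_prime(x) and lead_is_prime(x * x))
-- ===== Notes on version B (the rewrite author's own statement) =====
-- stated objective: faster
-- what changed: B parses the two leading characters once and runs a sqrt-bounded trial division (i*i <= h) in a single flat counting pass, where A re-parses int(op) on every trial and scans every candidate divisor below the value in nested for/else loops with a dead last-character comparison.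
import Mathlib
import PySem

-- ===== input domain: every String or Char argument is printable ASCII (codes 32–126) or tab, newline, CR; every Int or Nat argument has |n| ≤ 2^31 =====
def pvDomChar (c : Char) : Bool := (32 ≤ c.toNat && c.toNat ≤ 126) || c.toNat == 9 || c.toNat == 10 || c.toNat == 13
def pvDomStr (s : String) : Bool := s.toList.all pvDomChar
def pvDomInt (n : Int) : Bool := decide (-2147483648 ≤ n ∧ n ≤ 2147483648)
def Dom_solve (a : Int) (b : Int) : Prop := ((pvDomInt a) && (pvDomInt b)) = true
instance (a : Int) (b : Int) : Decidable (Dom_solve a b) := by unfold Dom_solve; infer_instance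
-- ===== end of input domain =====

-- B replaces A's full trial-division scan (with int(op) re-parsed on every trial) by a
-- sqrt-bounded trial division on the once-parsed leading pair, in one flat counting pass.

-- ===== PORT A =====
-- A's inner 'for i in range(2, int(op)): if int(op) % i == 0: break / else:' loop:
-- walks the range, false = break taken, true = the else branch runs.
-- int(op) is re-parsed from the two leading characters on each trial, as in A;
-- op is a slice of str(x), so int(op) never raises: .getD 0 is never used.
def pvLoopA (op : List Char) (is : List Int) : Bool :=
  match is with
  | [] => true
  | i :: rest =>
      if PySem.Int.mod ((PySem.Int.ofChars? op).getD 0) i == 0 then false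
      else pvLoopA op rest

-- the body of A's 'for x in range(a, b):' loop, updating result
def pvBodyA (result : Int) (x : Int) : Int :=
  if 4 ≤ PySem.List.len (PySem.Int.toChars x) then
    let s := PySem.Int.toChars x
    let op := PySem.List.slice s none (some 2)
    let lastx := PySem.List.slice s (some (-1)) (some (-2))
    if pvLoopA op (PySem.List.pyRange 2 ((PySem.Int.ofChars? op).getD 0) 1) then
      let squared := PySem.List.slice (PySem.Int.toChars (x * x)) none (some 2)
      let lastsquared := PySem.List.slice squared (some (-1)) (some (-2))
      if pvLoopA squared (PySem.List.pyRange 2 ((PySem.Int.ofChars? squared).getD 0) 1) then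
        if lastx == lastsquared then result + 1 else result
      else result
    else result
  else result

def solve (a : Int) (b : Int) : Int :=
  (PySem.List.pyRange a b 1).foldl pvBodyA 0

-- ===== PORT B =====
-- B's 'i = 2; while i * i <= h: if h % i == 0: return False; i += 1; return True'
def pvSqrtScan (h : Int) (i : Int) : Bool :=
  if _hle : i * i ≤ h then
    (if PySem.Int.mod h i == 0 then false else pvSqrtScan h (i + 1))
  else true
termination_by (h + 1 - i).toNat
decreasing_by
  have hi : i ≤ h := by nlinarith [sq_nonneg i]
  omega

-- B's lead_is_prime: parse the two leading characters once, then sqrt-bounded scan.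
-- int(str(m)[:2]) never raises (it is a slice of str(m)): .getD 0 is never used.
def pvLeadIsPrime (m : Int) : Bool :=
  pvSqrtScan ((PySem.Int.ofChars? (PySem.List.slice (PySem.Int.toChars m) none (some 2))).getD 0) 2

-- the filter of B's single counting comprehension
def pvCondB (x : Int) : Bool :=
  decide (4 ≤ PySem.List.len (PySem.Int.toChars x)) && pvLeadIsPrime x && pvLeadIsPrime (x * x)

def solve_alt (a : Int) (b : Int) : Int :=
  (((PySem.List.pyRange a b 1).filter pvCondB).map (fun _ => (1 : Int))).sum

-- ===== PRECONDITION & SPEC =====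
def Spec_solve (a : Int) (b : Int) (out : Int) : Prop := out = solve_alt a b
instance (a : Int) (b : Int) (out : Int) : Decidable (Spec_solve a b out) := by unfold Spec_solve; infer_instance

-- ===== CLAIM (what is proved, stated in full; the proofs are below) =====
def Claim_equal_solve : Prop := ∀ (a : Int) (b : Int), Dom_solve a b → Spec_solve a b (solve a b)

-- ===== LEMMAS AND PROOFS =====

-- A's loop over a list completed without break ↔ no listed divisor divides int(op).
theorem pvLoopA_eq_true_iff (op : List Char) (is : List Int) :
    pvLoopA op is = true ↔
      ∀ i ∈ is, PySem.Int.mod ((PySem.Int.ofChars? op).getD 0) i ≠ 0 := by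
  induction is with
  | nil => simp [pvLoopA]
  | cons i rest ih =>
      by_cases h : PySem.Int.mod ((PySem.Int.ofChars? op).getD 0) i = 0 <;>
        simp [pvLoopA, h, ih]

-- B's while loop returns true ↔ no divisor j ≥ i with j² ≤ h.
theorem pvSqrtScan_eq_true_iff (h i : Int) (h0 : 0 ≤ i) :
    pvSqrtScan h i = true ↔ ∀ j : Int, i ≤ j → j * j ≤ h → PySem.Int.mod h j ≠ 0 := by
  induction i using pvSqrtScan.induct h with
  | case1 i hle hdvd =>
      rw [pvSqrtScan, dif_pos hle, if_pos hdvd]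
      simp only [Bool.false_eq_true, false_iff, not_forall]
      exact ⟨i, le_rfl, hle, by simpa using hdvd⟩
  | case2 i hle hdvd ih =>
      rw [pvSqrtScan, dif_pos hle, if_neg hdvd, ih (by omega)]
      constructor
      · intro hall j hij hjj
        rcases eq_or_lt_of_le hij with rfl | hlt
        · intro hc; exact hdvd (by simpa using hc)
        · exact hall j (by omega) hjj
      · intro hall j hij hjj; exact hall j (by omega) hjj
  | case3 i hle =>
      rw [pvSqrtScan, dif_neg hle]
      refine ⟨fun _ j hij hjj hc => hle ?_, fun _ => rfl⟩
      have : i * i ≤ j * j := by nlinarith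
      omega

-- full trial division over [2, v) agrees with sqrt-bounded trial division, for every v
-- (including the vacuous v < 2 cases A reaches for negative x).
theorem trial_iff_sqrt (v : Int) :
    (∀ i : Int, 2 ≤ i → i < v → PySem.Int.mod v i ≠ 0) ↔
      (∀ j : Int, 2 ≤ j → j * j ≤ v → PySem.Int.mod v j ≠ 0) := by
  constructor
  · intro hall j h2 hjj
    exact hall j h2 (by nlinarith)
  · intro hall i h2 hiv hmod
    have hdvd : i ∣ v := (PySem.Int.mod_eq_zero_iff_dvd v i).1 hmod
    obtain ⟨q, hq⟩ := hdvd
    have hv0 : 0 < v := by omega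
    have hq2 : 2 ≤ q := by nlinarith
    by_cases hij : i * i ≤ v
    · exact hall i h2 hij hmod
    · have hqi : q < i := by nlinarith
      have hqq : q * q ≤ v := by nlinarith
      exact hall q hq2 hqq
        ((PySem.Int.mod_eq_zero_iff_dvd v q).2 ⟨i, by linarith [hq, mul_comm i q]⟩)

-- the slice s[-1:-2] is always empty.
theorem slice_neg_one_neg_two (s : List Char) :
    PySem.List.slice s (some (-1)) (some (-2)) = [] := by
  simp only [PySem.List.slice, PySem.List.clampIdx]
  rcases eq_or_ne s [] with rfl | h
  · simp
  · have h1 : 1 ≤ s.length := by cases s with | nil => exact absurd rfl h | cons c t => simp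
    split_ifs <;> simp_all
    omega

-- A's loop on the 2-char prefix of str(m) computes B's pvLeadIsPrime m.
theorem loopA_eq_leadIsPrime (m : Int) :
    pvLoopA (PySem.List.slice (PySem.Int.toChars m) none (some 2))
        (PySem.List.pyRange 2
          ((PySem.Int.ofChars? (PySem.List.slice (PySem.Int.toChars m) none (some 2))).getD 0) 1)
      = pvLeadIsPrime m := by
  set op := PySem.List.slice (PySem.Int.toChars m) none (some 2) with hop
  set v := (PySem.Int.ofChars? op).getD 0 with hv
  rw [pvLeadIsPrime, ← hop, ← hv, Bool.eq_iff_iff,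
    pvLoopA_eq_true_iff, pvSqrtScan_eq_true_iff _ _ (by omega)]
  constructor
  · intro hall
    exact (trial_iff_sqrt v).1 fun i h2 hiv =>
      hall i (PySem.List.mem_pyRange_one.2 ⟨h2, hiv⟩)
  · intro hall i hi
    have hb := PySem.List.mem_pyRange_one.1 hi
    exact (trial_iff_sqrt v).2 hall i hb.1 hb.2

-- A's body adds B's 0/1 contribution.
theorem body_eq (result x : Int) :
    pvBodyA result x = result + (if pvCondB x then (1 : Int) else 0) := by
  rw [pvBodyA, pvCondB]
  simp only [PySem.List.len_eq, slice_neg_one_neg_two, loopA_eq_leadIsPrime, BEq.rfl, if_true]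
  by_cases h4 : (4 : Int) ≤ ((PySem.Int.toChars x).length : Int) <;>
    by_cases h1 : pvLeadIsPrime x = true <;>
    by_cases h2 : pvLeadIsPrime (x * x) = true <;>
    simp [h4, h1, h2]

-- A's accumulating loop computes init plus B's count, for every list of candidates.
theorem foldl_bodyA_eq (l : List Int) (init : Int) :
    l.foldl pvBodyA init = init + ((l.filter pvCondB).map (fun _ => (1 : Int))).sum := by
  induction l generalizing init with
  | nil => simp
  | cons y ys ih =>
      rw [List.foldl_cons, ih, body_eq, List.filter_cons]
      by_cases hy : pvCondB y = true
      · rw [if_pos hy, if_pos hy, List.map_cons, List.sum_cons]; ring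
      · rw [if_neg hy, if_neg hy]; ring

-- ===== VERDICT (by name: the statement is the Claim_ definition above) =====
theorem solve_spec : Claim_equal_solve := by
  intro a b _
  show solve a b = solve_alt a b
  rw [solve, solve_alt, foldl_bodyA_eq, zero_add]
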